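-- pv_equiv track=rewrite | github.com/i-X-ce/PokemonYellow_BadAppleTAS | src/python/common.py | hex2input
-- ===== SOURCE A (Python) =====
-- def hex2input(hex, len=2):
--     inputDict = { 0: "A", 1: "B", 2: "s", 3: "S" }
--     s = ""
--     for m in range(len):
--         for key, value in inputDict.items():
--             if (((hex >> ((len - m - 1) * 4)) & (1 << key)) != 0) ^ (key == 1):
--                 s += value
--             else:
--                 s += "."
--         s += "\n"
--     return s
-- ===== SOURCE B (Python) =====
-- def hex2input(hex, len=2):
--     # Build the 16-entry nibble table once, then do a single lookup pass per row.
--     table = [("A" if v & 1 else ".") + ("." if v & 2 else "B")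
--              + ("s" if v & 4 else ".") + ("S" if v & 8 else ".")
--              for v in range(16)]
--     return "".join(table[(hex >> (4 * (len - 1 - m))) & 0xF] + "\n" for m in range(len))
-- ===== Notes on version B (the rewrite author's own statement) =====
-- stated objective: alternative
-- what changed: Replaces the nested per-bit scan (4 dict-item tests per nibble) by a 16-entry nibble->row table built once, then a single lookup pass over the nibbles.
import Mathlib
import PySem

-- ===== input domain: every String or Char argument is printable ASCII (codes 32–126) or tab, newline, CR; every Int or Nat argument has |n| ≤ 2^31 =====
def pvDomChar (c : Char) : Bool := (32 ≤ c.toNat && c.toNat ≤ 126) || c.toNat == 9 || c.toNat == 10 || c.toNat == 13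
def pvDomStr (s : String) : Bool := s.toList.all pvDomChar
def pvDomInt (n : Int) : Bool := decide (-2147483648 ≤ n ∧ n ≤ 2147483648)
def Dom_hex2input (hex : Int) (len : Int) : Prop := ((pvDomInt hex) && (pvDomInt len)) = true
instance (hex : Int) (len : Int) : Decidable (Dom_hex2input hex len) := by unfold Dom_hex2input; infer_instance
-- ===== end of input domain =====

-- B replaces A's nested per-bit scan by a 16-entry nibble table built once plus a single lookup pass (alternative decomposition, no speed claim).

-- ===== PORT A =====
-- 'hex >> j' is ported as floor division by 2^j and '(x & (1 << key)) != 0' as the bit test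
-- '((x // 2^key) % 2) != 0' (floor semantics) — both exact for Python's two's-complement ints.
-- The shift (len - m - 1) * 4 is nonnegative for every m produced by range(len), so .toNat is exact.
def hex2input (hex : Int) (len : Int) : String :=
  let inputDict : List (Int × String) := [(0, "A"), (1, "B"), (2, "s"), (3, "S")]
  (PySem.List.pyRange 0 len 1).foldl
    (fun s m =>
      (inputDict.foldl
        (fun s kv =>
          if (PySem.Int.mod (PySem.Int.floordiv (PySem.Int.floordiv hex (2 ^ ((len - m - 1) * 4).toNat)) (2 ^ kv.1.toNat)) 2 != 0) ^^ (kv.1 == 1)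
          then s ++ kv.2
          else s ++ ".") s) ++ "\n")
    ""

-- ===== PORT B =====
-- 'v & 1', 'v & 2', 'v & 4', 'v & 8' truthiness is ported as the bit tests '(v // 2^k) % 2 != 0' (exact);
-- 'x & 0xF' is ported as 'x % 16' with floor (Python) mod — exact for negative x too.
def pvTable : List String :=
  (PySem.List.pyRange 0 16 1).map (fun v =>
    (if PySem.Int.mod v 2 != 0 then "A" else ".") ++
    (if PySem.Int.mod (PySem.Int.floordiv v 2) 2 != 0 then "." else "B") ++
    (if PySem.Int.mod (PySem.Int.floordiv v 4) 2 != 0 then "s" else ".") ++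
    (if PySem.Int.mod (PySem.Int.floordiv v 8) 2 != 0 then "S" else "."))

def hex2input_alt (hex : Int) (len : Int) : String :=
  PySem.Str.join ""
    ((PySem.List.pyRange 0 len 1).map (fun m =>
      PySem.List.pyGetD pvTable
        (PySem.Int.mod (PySem.Int.floordiv hex (2 ^ (4 * (len - 1 - m)).toNat)) 16) "" ++ "\n"))

-- ===== PRECONDITION & SPEC =====
def Spec_hex2input (hex : Int) (len : Int) (out : String) : Prop := out = hex2input_alt hex len
instance (hex : Int) (len : Int) (out : String) : Decidable (Spec_hex2input hex len out) := by unfold Spec_hex2input; infer_instance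

-- ===== CLAIM (what is proved, stated in full; the proofs are below) =====
def Claim_equal_hex2input : Prop := ∀ (hex : Int) (len : Int), Dom_hex2input hex len → Spec_hex2input hex len (hex2input hex len)

-- ===== LEMMAS AND PROOFS =====

lemma pv_join_cons (a : String) (l : List String) :
    PySem.Str.join "" (a :: l) = a ++ PySem.Str.join "" l := by
  simp [PySem.Str.join, PySem.Chars.join, List.intercalate]
  cases l <;> simp [String.ofList_append]

-- one row of A's inner scan over the four buttons, as a function of the shifted value x,
-- equals one entry-shaped row of B evaluated at the nibble x % 16
lemma pv_row (x : Int) (s : String) :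
    (([(0, "A"), (1, "B"), (2, "s"), (3, "S")] : List (Int × String)).foldl
      (fun s kv =>
        if (PySem.Int.mod (PySem.Int.floordiv x (2 ^ kv.1.toNat)) 2 != 0) ^^ (kv.1 == 1)
        then s ++ kv.2
        else s ++ ".") s)
    = s ++ ((if PySem.Int.mod (PySem.Int.mod x 16) 2 != 0 then "A" else ".") ++
            (if PySem.Int.mod (PySem.Int.floordiv (PySem.Int.mod x 16) 2) 2 != 0 then "." else "B") ++
            (if PySem.Int.mod (PySem.Int.floordiv (PySem.Int.mod x 16) 4) 2 != 0 then "s" else ".") ++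
            (if PySem.Int.mod (PySem.Int.floordiv (PySem.Int.mod x 16) 8) 2 != 0 then "S" else ".")) := by
  simp only [List.foldl]
  norm_num
  have r1 : x % 16 / 2 % 2 = x / 2 % 2 := by omega
  have r2 : x % 16 / 4 % 2 = x / 4 % 2 := by omega
  have r3 : x % 16 / 8 % 2 = x / 8 % 2 := by omega
  have d1 : (2 ∣ x / 2) ↔ x / 2 % 2 = 0 := by omega
  rw [r1, r2, r3]
  simp only [d1]
  norm_num
  have h0 : x % 2 = 0 ∨ x % 2 = 1 := by omega
  have h1 : x / 2 % 2 = 0 ∨ x / 2 % 2 = 1 := by omega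
  have h2 : x / 4 % 2 = 0 ∨ x / 4 % 2 = 1 := by omega
  have h3 : x / 8 % 2 = 0 ∨ x / 8 % 2 = 1 := by omega
  rcases h0 with h0 | h0 <;> rcases h1 with h1 | h1 <;> rcases h2 with h2 | h2 <;>
    rcases h3 with h3 | h3 <;> simp [d1, h0, h1, h2, h3, String.append_assoc]

-- A's outer loop over any list of row indices produces the concatenation of B's rows
lemma pv_fold (hex len : Int) :
    ∀ (l : List Int) (s : String),
      l.foldl (fun s m =>
        (([(0, "A"), (1, "B"), (2, "s"), (3, "S")] : List (Int × String)).foldl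
          (fun s kv =>
            if (PySem.Int.mod (PySem.Int.floordiv (PySem.Int.floordiv hex (2 ^ ((len - m - 1) * 4).toNat)) (2 ^ kv.1.toNat)) 2 != 0) ^^ (kv.1 == 1)
            then s ++ kv.2
            else s ++ ".") s) ++ "\n") s
      = s ++ PySem.Str.join "" (l.map (fun m =>
          PySem.List.pyGetD pvTable
            (PySem.Int.mod (PySem.Int.floordiv hex (2 ^ (4 * (len - 1 - m)).toNat)) 16) "" ++ "\n"))
  | [], s => by simp [PySem.Str.join, PySem.Chars.join, List.intercalate]
  | a :: t, s => by
    rw [List.foldl_cons, pv_fold hex len t, List.map_cons, pv_join_cons,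
        pv_row (PySem.Int.floordiv hex (2 ^ ((len - a - 1) * 4).toNat)) s,
        show (len - a - 1) * 4 = 4 * (len - 1 - a) from by ring]
    have hv0 : 0 ≤ PySem.Int.mod (PySem.Int.floordiv hex (2 ^ (4 * (len - 1 - a)).toNat)) 16 := by
      rw [PySem.Int.mod_eq_emod_of_pos (by norm_num : (0:Int) < 16)]; omega
    have hv1 : PySem.Int.mod (PySem.Int.floordiv hex (2 ^ (4 * (len - 1 - a)).toNat)) 16 < 16 := by
      rw [PySem.Int.mod_eq_emod_of_pos (by norm_num : (0:Int) < 16)]; omega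
    unfold pvTable
    rw [PySem.List.pyGetD_map_pyRange_of_nonneg _ 16 _ "" hv0 hv1]
    simp [String.append_assoc]

-- ===== VERDICT (by name: the statement is the Claim_ definition above) =====
theorem hex2input_spec : Claim_equal_hex2input := by
  intro hex len _
  unfold Spec_hex2input hex2input hex2input_alt
  rw [pv_fold hex len (PySem.List.pyRange 0 len 1) ""]
  simp
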